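-- pv_equiv track=rewrite | github.com/crasu/gr-manchesterpdu | python/manchester_pdu_decoder.py | manchester_decode
-- ===== SOURCE A (Python) =====
-- def manchester_decode(pulseStream):
--     i = 1
--     bits = ''
--
--     # here pulseStream[i] is "guaranteed" to be the beginning of a bit
--     while i < len(pulseStream):
--         if pulseStream[i] == pulseStream[i-1]:
--             i = i - 1
--             raise(IOError("Cannot manchester decode {}".format(pulseStream)))
--         if pulseStream[i] == '1':
--             bits += '1'
--         else:
--             bits += '0'
--         i = i + 2
--
--     return bits
-- ===== SOURCE B (Python) =====
-- def manchester_decode(pulseStream):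
--     it = iter(pulseStream)
--     pairs = list(zip(it, it))
--     if any(a == b for a, b in pairs):
--         raise IOError("Cannot manchester decode {}".format(pulseStream))
--     return ''.join('1' if b == '1' else '0' for _, b in pairs)
-- ===== Notes on version B (the rewrite author's own statement) =====
-- stated objective: simpler
-- what changed: Replaces A's index-stepping while loop with string mutation by pairing the characters once (zip of one iterator with itself), then a pure validation pass and a join-based construction pass over those pairs.
import Mathlib
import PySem

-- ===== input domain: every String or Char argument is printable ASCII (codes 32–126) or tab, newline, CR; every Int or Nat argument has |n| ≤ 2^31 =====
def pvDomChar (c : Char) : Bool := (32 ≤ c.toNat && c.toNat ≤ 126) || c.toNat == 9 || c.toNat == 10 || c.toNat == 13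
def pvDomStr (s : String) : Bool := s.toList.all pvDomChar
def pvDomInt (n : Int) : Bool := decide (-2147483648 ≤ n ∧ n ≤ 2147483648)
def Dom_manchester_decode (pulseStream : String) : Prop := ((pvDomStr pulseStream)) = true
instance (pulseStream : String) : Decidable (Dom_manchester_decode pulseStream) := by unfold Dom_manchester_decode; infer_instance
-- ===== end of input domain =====

-- B pairs the characters once and decodes the pairs in two passes: simpler than A's index-stepping loop.

-- ===== PORT A =====
-- A's while loop: index i starts at 1, advances by 2; on pulseStream[i] == pulseStream[i-1]
-- Python raises IOError (excluded by Pre_; the port returns the bits built so far there).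
def mdLoopA (l : List Char) (i : Nat) (bits : String) : String :=
  if h : i < l.length then
    if l[i] == l[i-1]! then bits
    else mdLoopA l (i+2) (bits ++ (if l[i] == '1' then "1" else "0"))
  else bits
termination_by l.length - i
decreasing_by omega

def manchester_decode (pulseStream : String) : String :=
  mdLoopA pulseStream.toList 1 ""

-- ===== PORT B =====
-- list(zip(it, it)): consecutive characters chunked into pairs, odd trailing char dropped
def mdPairs : List Char → List (Char × Char)
  | a :: b :: rest => (a, b) :: mdPairs rest
  | _ => []

def manchester_decode_alt (pulseStream : String) : String :=
  let pairs := mdPairs pulseStream.toList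
  if pairs.any (fun p => p.1 == p.2) then ""  -- Python raises IOError here (excluded by Pre_)
  else String.ofList (pairs.map (fun p => if p.2 == '1' then '1' else '0'))

-- ===== PRECONDITION & SPEC =====
-- In each 2-character block the two characters must differ; otherwise A raises IOError.
def Pre_manchester_decode (pulseStream : String) : Prop :=
  ∀ i < pulseStream.toList.length / 2,
    pulseStream.toList[2*i]? ≠ pulseStream.toList[2*i+1]?

instance (pulseStream : String) : Decidable (Pre_manchester_decode pulseStream) := by
  unfold Pre_manchester_decode; infer_instance

def pvWitness_manchester_decode : String := "0110"

def Spec_manchester_decode (pulseStream : String) (out : String) : Prop := out = manchester_decode_alt pulseStream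
instance (pulseStream : String) (out : String) : Decidable (Spec_manchester_decode pulseStream out) := by unfold Spec_manchester_decode; infer_instance

-- ===== CLAIM (what is proved, stated in full; the proofs are below) =====
def Claim_equal_manchester_decode : Prop := ∀ (pulseStream : String), Dom_manchester_decode pulseStream → Pre_manchester_decode pulseStream → Spec_manchester_decode pulseStream (manchester_decode pulseStream)

-- ===== LEMMAS AND PROOFS =====

-- proof helper: the pairwise-difference condition as a structural check
def pvBlocksDiffer : List Char → Bool
  | a :: b :: rest => (a != b) && pvBlocksDiffer rest
  | _ => true

lemma blocksDiffer_of_pre (l : List Char)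
    (h : ∀ i < l.length / 2, l[2*i]? ≠ l[2*i+1]?) : pvBlocksDiffer l = true :=
  match l with
  | [] => rfl
  | [_] => rfl
  | a :: b :: rest => by
    have h0 := h 0 (by simp only [List.length_cons]; omega)
    simp only [Nat.mul_zero, List.getElem?_cons_zero, Nat.zero_add, List.getElem?_cons_succ,
      ne_eq, Option.some_inj] at h0
    have hr : ∀ i < rest.length / 2, rest[2*i]? ≠ rest[2*i+1]? := by
      intro i hi
      have := h (i+1) (by simp only [List.length_cons]; omega)
      have e1 : 2*(i+1) = 2*i + 1 + 1 := by omega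
      rw [e1] at this
      simpa [List.getElem?_cons_succ] using this
    simp [pvBlocksDiffer, blocksDiffer_of_pre rest hr, h0]

lemma mdPairs_short (l : List Char) (h : l.length ≤ 1) : mdPairs l = [] := by
  match l with
  | [] => rfl
  | [a] => rfl
  | a :: b :: rest => simp at h

lemma any_eq_false_of_blocksDiffer (l : List Char) (h : pvBlocksDiffer l = true) :
    (mdPairs l).any (fun p => p.1 == p.2) = false :=
  match l, h with
  | [], _ => rfl
  | [_], _ => rfl
  | a :: b :: rest, h => by
      simp only [pvBlocksDiffer, Bool.and_eq_true, bne_iff_ne, ne_eq] at h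
      simp [mdPairs, any_eq_false_of_blocksDiffer rest h.2, h.1]

lemma mdLoopA_eq (l : List Char) (i : Nat) (bits : String) (hi : 1 ≤ i)
    (hok : pvBlocksDiffer (l.drop (i-1)) = true) :
    mdLoopA l i bits =
      bits ++ String.ofList ((mdPairs (l.drop (i-1))).map (fun p => if p.2 == '1' then '1' else '0')) := by
  by_cases h : i < l.length
  · have h1 : i - 1 < l.length := by omega
    have hd1 : l.drop (i-1) = l[i-1] :: l.drop i := by
      have e : i - 1 + 1 = i := by omega
      have := List.drop_eq_getElem_cons h1
      rwa [e] at this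
    have hd2 : l.drop i = l[i] :: l.drop (i+1) := List.drop_eq_getElem_cons h
    have hdrop : l.drop (i-1) = l[i-1] :: l[i] :: l.drop (i+1) := by rw [hd1, hd2]
    rw [hdrop] at hok
    simp only [pvBlocksDiffer, Bool.and_eq_true, bne_iff_ne, ne_eq] at hok
    have hne : ¬ (l[i] == l[i-1]) = true := by
      simp only [beq_iff_eq]; exact fun he => hok.1 he.symm
    have hii : i + 2 - 1 = i + 1 := by omega
    rw [mdLoopA]
    simp only [h, dif_pos, List.getElem!_eq_getElem?_getD, List.getElem?_eq_getElem h1,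
      Option.getD_some]
    rw [if_neg hne]
    rw [mdLoopA_eq l (i+2) _ (by omega) (by rw [hii]; exact hok.2)]
    rw [hii, hdrop]
    simp only [mdPairs, List.map_cons]
    rw [String.append_assoc]
    congr 1
    cases hc : (l[i] == '1') <;>
      simp only [if_true, if_false, Bool.false_eq_true] <;>
      first
        | (rw [show ("1" : String) = String.ofList ['1'] from rfl, ← String.ofList_append]; rfl)
        | (rw [show ("0" : String) = String.ofList ['0'] from rfl, ← String.ofList_append]; rfl)
  · rw [mdLoopA]
    simp only [h, dif_neg, not_false_iff]
    have : (l.drop (i-1)).length ≤ 1 := by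
      simp only [List.length_drop]; omega
    rw [mdPairs_short _ this]
    simp
termination_by l.length - i
decreasing_by omega

-- ===== VERDICT (by name: the statement is the Claim_ definition above) =====
theorem manchester_decode_spec : Claim_equal_manchester_decode := by
  intro s _ hpre'
  have hpre : pvBlocksDiffer s.toList = true := blocksDiffer_of_pre _ hpre'
  unfold Spec_manchester_decode manchester_decode manchester_decode_alt
  have hok : pvBlocksDiffer (s.toList.drop 0) = true := by simpa using hpre
  rw [mdLoopA_eq s.toList 1 "" le_rfl (by simpa using hok)]
  simp only [Nat.sub_self, List.drop_zero] at *
  rw [any_eq_false_of_blocksDiffer _ hpre]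
  apply String.ext
  simp
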